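-- pv_equiv track=rewrite | github.com/helenandmir/fair-and-equitable | FairKCenterEexpanded.py | updatr_dict
-- ===== SOURCE A (Python) =====
-- def updatr_dict(dic_new_reps_colors, req_dic):
--     B = {}
--     for value in dic_new_reps_colors.values():
--         B[value] = B.get(value, 0) + 1
--
--     for v in req_dic.keys():
--         if v in B.keys():
--             req_dic[v] = req_dic[v] - B[v]
--
--     return req_dic
-- ===== SOURCE B (Python) =====
-- def updatr_dict(dic_new_reps_colors, req_dic):
--     for value in dic_new_reps_colors.values():
--         if value in req_dic:
--             req_dic[value] = req_dic[value] - 1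
--     return req_dic
-- ===== Notes on version B (the rewrite author's own statement) =====
-- stated objective: simpler
-- what changed: Drops the intermediate frequency dict: one fused pass over the values decrements req_dic[value] by 1 per occurrence instead of counting first and subtracting counts in a second pass.
import Mathlib
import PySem

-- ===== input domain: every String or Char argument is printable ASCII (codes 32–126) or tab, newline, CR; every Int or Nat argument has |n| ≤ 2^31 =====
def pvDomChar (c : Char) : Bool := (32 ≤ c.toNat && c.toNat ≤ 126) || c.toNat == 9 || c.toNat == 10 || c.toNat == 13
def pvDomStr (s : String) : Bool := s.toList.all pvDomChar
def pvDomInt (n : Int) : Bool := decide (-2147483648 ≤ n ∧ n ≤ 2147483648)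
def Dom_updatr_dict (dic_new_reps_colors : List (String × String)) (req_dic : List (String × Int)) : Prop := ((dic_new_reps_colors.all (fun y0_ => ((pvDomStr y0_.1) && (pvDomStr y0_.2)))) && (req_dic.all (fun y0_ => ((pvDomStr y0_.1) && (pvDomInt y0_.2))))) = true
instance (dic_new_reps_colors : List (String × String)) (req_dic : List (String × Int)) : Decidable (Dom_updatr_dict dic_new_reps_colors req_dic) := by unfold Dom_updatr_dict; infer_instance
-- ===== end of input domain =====

-- B drops A's intermediate frequency dict: one fused pass over the values decrements the
-- matching requirement by 1 per occurrence (both Pythons also mutate req_dic in place identically; the equivalence proved is about the return value).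

-- ===== PORT A =====
-- count values into B, then subtract B's counts from req_dic for the keys present in B
def updatr_dict (dic_new_reps_colors : List (String × String)) (req_dic : List (String × Int)) : List (String × Int) :=
  let vals := (PySem.Dict.ofList dic_new_reps_colors).values
  let B := vals.foldl (fun d v => d.insert v (d.getD v 0 + 1)) (PySem.Dict.empty : PySem.Dict String Int)
  let r0 := PySem.Dict.ofList req_dic
  let r := r0.keys.foldl (fun r k => if B.contains k then r.insert k (r.getD k 0 - B.getD k 0) else r) r0
  r.items

-- ===== PORT B =====
-- single pass over the values: decrement req_dic[value] when value is a key of req_dic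
def updatr_dict_alt (dic_new_reps_colors : List (String × String)) (req_dic : List (String × Int)) : List (String × Int) :=
  let r0 := PySem.Dict.ofList req_dic
  ((PySem.Dict.ofList dic_new_reps_colors).values.foldl
    (fun r v => if r.contains v then r.insert v (r.getD v 0 - 1) else r) r0).items

-- ===== PRECONDITION & SPEC =====
def Spec_updatr_dict (dic_new_reps_colors : List (String × String)) (req_dic : List (String × Int)) (out : List (String × Int)) : Prop := out = updatr_dict_alt dic_new_reps_colors req_dic
instance (dic_new_reps_colors : List (String × String)) (req_dic : List (String × Int)) (out : List (String × Int)) : Decidable (Spec_updatr_dict dic_new_reps_colors req_dic out) := by unfold Spec_updatr_dict; infer_instance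

-- ===== CLAIM (what is proved, stated in full; the proofs are below) =====
def Claim_equal_updatr_dict : Prop := ∀ (dic_new_reps_colors : List (String × String)) (req_dic : List (String × Int)), Dom_updatr_dict dic_new_reps_colors req_dic → Spec_updatr_dict dic_new_reps_colors req_dic (updatr_dict dic_new_reps_colors req_dic)

-- ===== LEMMAS AND PROOFS =====

-- A's subtraction loop leaves the key set unchanged (it only reinserts existing keys)
theorem pv_keysA (cnt : PySem.Dict String Int) :
    ∀ (ks : List String) (r : PySem.Dict String Int), (∀ k ∈ ks, r.contains k = true) →
      (ks.foldl (fun r k => if cnt.contains k then r.insert k (r.getD k 0 - cnt.getD k 0) else r) r).keys = r.keys := by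
  intro ks
  induction ks with
  | nil => intro r _; rfl
  | cons k ks ih =>
    intro r h
    have hk : r.contains k = true := h k (by simp)
    simp only [List.foldl_cons]
    by_cases hc : cnt.contains k = true
    · rw [if_pos hc, ih _ (by
        intro k' hk'
        rw [PySem.Dict.contains_insert]
        simp [h k' (by simp [hk'])]), PySem.Dict.keys_insert_of_contains _ _ hk]
    · rw [if_neg hc]
      exact ih r (fun k' hk' => h k' (by simp [hk']))

-- value of A's subtraction loop at a key, for a duplicate-free key list
theorem pv_getDA (cnt : PySem.Dict String Int) (x : String) :
    ∀ (ks : List String) (r : PySem.Dict String Int), ks.Nodup →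
      (ks.foldl (fun r k => if cnt.contains k then r.insert k (r.getD k 0 - cnt.getD k 0) else r) r).getD x 0 =
        if x ∈ ks ∧ cnt.contains x then r.getD x 0 - cnt.getD x 0 else r.getD x 0 := by
  intro ks
  induction ks with
  | nil => intro r _; simp
  | cons k ks ih =>
    intro r hnd
    have hnd' : ks.Nodup := hnd.of_cons
    have hknotin : k ∉ ks := by simp_all [List.nodup_cons]
    simp only [List.foldl_cons]
    by_cases hc : cnt.contains k = true
    · rw [if_pos hc, ih _ hnd']
      by_cases hx : x ∈ ks
      · have hxk : x ≠ k := fun h => hknotin (h ▸ hx)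
        rw [PySem.Dict.getD_insert]
        simp [hx, hxk]
      · by_cases hxk : x = k
        · subst hxk
          simp [hx, hc]
        · rw [PySem.Dict.getD_insert]
          simp [hx, hxk]
    · rw [if_neg hc, ih _ hnd']
      have hc' : cnt.contains k = false := by simpa using hc
      by_cases hxk : x = k
      · subst hxk; simp [hc']
      · simp [hxk]

-- B's fused loop leaves the key set unchanged
theorem pv_keysB :
    ∀ (vs : List String) (r : PySem.Dict String Int),
      (vs.foldl (fun r v => if r.contains v then r.insert v (r.getD v 0 - 1) else r) r).keys = r.keys := by
  intro vs
  induction vs with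
  | nil => intro r; rfl
  | cons v vs ih =>
    intro r
    simp only [List.foldl_cons]
    by_cases hc : r.contains v = true
    · rw [if_pos hc, ih, PySem.Dict.keys_insert_of_contains _ _ hc]
    · rw [if_neg hc]
      exact ih r

-- value of B's fused loop at a key: the original value minus the number of occurrences, for present keys
theorem pv_getDB (x : String) :
    ∀ (vs : List String) (r : PySem.Dict String Int),
      (vs.foldl (fun r v => if r.contains v then r.insert v (r.getD v 0 - 1) else r) r).getD x 0 =
        if r.contains x then r.getD x 0 - vs.count x else r.getD x 0 := by
  intro vs
  induction vs with
  | nil => intro r; simp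
  | cons v vs ih =>
    intro r
    simp only [List.foldl_cons]
    by_cases hc : r.contains v = true
    · rw [if_pos hc, ih]
      by_cases hxv : x = v
      · subst hxv
        simp [hc]
        ring
      · have hvx : v ≠ x := fun h => hxv h.symm
        simp [PySem.Dict.contains_insert, PySem.Dict.getD_insert, hxv, hvx]
    · rw [if_neg hc, ih]
      have hc' : r.contains v = false := by simpa using hc
      by_cases hxv : x = v
      · subst hxv; simp [hc']
      · have hvx : v ≠ x := fun h => hxv h.symm
        simp [hvx]

-- the counter fold contains exactly the values that occur
theorem pv_cnt_contains (vs : List String) (x : String) :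
    (vs.foldl (fun d v => d.insert v (d.getD v 0 + 1)) (PySem.Dict.empty : PySem.Dict String Int)).contains x = decide (x ∈ vs) := by
  rw [PySem.Dict.contains_eq_decide_mem_keys, PySem.Dict.keys_foldl_insert]
  simp [PySem.Set.mem_update, PySem.Dict.keys_empty]

-- the counter fold's entry at x is the occurrence count
theorem pv_cnt_getD (vs : List String) (x : String) :
    (vs.foldl (fun d v => d.insert v (d.getD v 0 + 1)) (PySem.Dict.empty : PySem.Dict String Int)).getD x 0 = vs.count x := by
  rw [PySem.Dict.getD_foldl_insert_add_one]
  simp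

-- ===== VERDICT (by name: the statement is the Claim_ definition above) =====
theorem updatr_dict_spec : Claim_equal_updatr_dict := by
  intro dic req _
  unfold Spec_updatr_dict
  dsimp only [updatr_dict, updatr_dict_alt]
  set vals := (PySem.Dict.ofList dic).values with hvals
  set r0 := PySem.Dict.ofList req with hr0
  have hnd : r0.keys.Nodup := PySem.Dict.nodup_keys_ofList req
  set cnt := vals.foldl (fun d v => d.insert v (d.getD v 0 + 1)) (PySem.Dict.empty : PySem.Dict String Int) with hcnt
  set rA := r0.keys.foldl (fun r k => if cnt.contains k then r.insert k (r.getD k 0 - cnt.getD k 0) else r) r0 with hrA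
  set rB := vals.foldl (fun r v => if r.contains v then r.insert v (r.getD v 0 - 1) else r) r0 with hrB
  have hkA : rA.keys = r0.keys := pv_keysA cnt r0.keys r0 (fun k hk => by
    rw [PySem.Dict.contains_eq_decide_mem_keys]; simp [hk])
  have hkB : rB.keys = r0.keys := pv_keysB vals r0
  have hsame : ∀ y, rA.getD y 0 = rB.getD y 0 := by
    intro y
    rw [hrA, hrB, pv_getDA cnt y r0.keys r0 hnd, pv_getDB y vals r0,
      PySem.Dict.contains_eq_decide_mem_keys r0 y]
    by_cases hx : y ∈ r0.keys
    · by_cases hcy : cnt.contains y = true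
      · rw [pv_cnt_getD]
        simp [hx, hcy]
      · have hny : y ∉ vals := by
          rw [pv_cnt_contains] at hcy; simpa using hcy
        simp [hx, hcy, List.count_eq_zero_of_not_mem hny]
    · simp [hx]
  have heq : rA = rB := by
    apply PySem.Dict.ext
    rw [PySem.Dict.items_eq_map_keys rA (hkA ▸ hnd) 0, PySem.Dict.items_eq_map_keys rB (hkB ▸ hnd) 0,
      hkA, hkB]
    exact List.map_congr_left (fun k _ => by rw [hsame k])
  rw [heq]
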